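-- pv_equiv track=rewrite | github.com/DawsonBodenhamer/chunkpartyspreader | tools/update_cps_techspec.py | remove_java_imports
-- ===== SOURCE A (Python) =====
-- def remove_java_imports(content):
--     """
--     Removes all import statements and swallows subsequent blank lines,
--     then inserts a single placeholder line.
--     """
--     lines = content.splitlines()
--     new_lines = []
--     in_import_block = False
--     placeholder_added = False
--
--     for line in lines:
--         stripped = line.strip()
--         if stripped.startswith("import "):
--             in_import_block = True
--             if not placeholder_added:
--                 new_lines.append("// (Imports omitted to save token count)")
--                 placeholder_added = True
--             continue
--         if in_import_block:
--             if stripped == "":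
--                 continue
--             else:
--                 new_lines.append("")
--                 in_import_block = False
--         new_lines.append(line)
--     return "\n".join(new_lines)
-- ===== SOURCE B (Python) =====
-- def remove_java_imports(content):
--     """
--     Removes all import statements and swallows subsequent blank lines,
--     then inserts a single placeholder line.
--     """
--     lines = content.splitlines()
--
--     def classify(line):
--         s = line.strip()
--         if s.startswith("import "):
--             return 0  # import
--         if s == "":
--             return 1  # blank
--         return 2      # code
--
--     out = []
--     placeholder_done = False
--     pending_import = False
--     i = 0
--     n = len(lines)
--     while i < n:
--         c = classify(lines[i])
--         j = i + 1
--         while j < n and classify(lines[j]) == c: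
--             j += 1
--         if c == 0:
--             if not placeholder_done:
--                 out.append("// (Imports omitted to save token count)")
--                 placeholder_done = True
--             pending_import = True
--         elif c == 1:
--             if not pending_import:
--                 out.extend(lines[i:j])
--         else:
--             if pending_import:
--                 out.append("")
--                 pending_import = False
--             out.extend(lines[i:j])
--         i = j
--     return "\n".join(out)
-- ===== Notes on version B (the rewrite author's own statement) =====
-- stated objective: alternative
-- what changed: Replaces A's per-line state-machine fold (in_import_block flag mutated line by line) by a run-based walk: lines are classified once (import/blank/code), consecutive runs of one class are located with an inner scan and processed as whole blocks, emitting the placeholder, swallowing blank runs after imports, and inserting the separator per run rather than per line.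
import Mathlib
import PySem

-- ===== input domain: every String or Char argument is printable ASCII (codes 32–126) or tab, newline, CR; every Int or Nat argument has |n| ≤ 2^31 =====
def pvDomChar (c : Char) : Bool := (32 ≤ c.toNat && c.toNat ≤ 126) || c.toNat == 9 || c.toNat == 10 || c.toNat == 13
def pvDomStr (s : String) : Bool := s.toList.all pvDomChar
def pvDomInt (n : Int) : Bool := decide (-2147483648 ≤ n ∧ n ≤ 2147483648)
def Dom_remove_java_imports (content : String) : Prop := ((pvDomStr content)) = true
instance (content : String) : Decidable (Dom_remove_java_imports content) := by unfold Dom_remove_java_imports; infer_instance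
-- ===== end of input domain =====

-- B replaces A's per-line flag-mutating loop by a run-based walk over maximal blocks of
-- same-class (import/blank/code) lines — an alternative decomposition of the same linear pass.

-- ===== PORT A =====
-- fold state = (new_lines, in_import_block, placeholder_added), exactly A's loop
def remove_java_imports (content : String) : String :=
  PySem.Str.join "\n"
    ((PySem.Str.splitlines content).foldl
      (fun (s : List String × Bool × Bool) line =>
        let stripped := PySem.Str.strip line
        if PySem.Str.startswith stripped "import " then
          (if s.2.2 = false then s.1 ++ ["// (Imports omitted to save token count)"] else s.1,
           true, true)
        else if s.2.1 then
          if stripped = "" then s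
          else (s.1 ++ ["", line], false, s.2.2)
        else
          (s.1 ++ [line], s.2.1, s.2.2))
      ([], false, false)).1

-- ===== PORT B =====
-- Source B's classify: 0 = import line, 1 = blank, 2 = code
def pvClassify (line : String) : Nat :=
  let s := PySem.Str.strip line
  if PySem.Str.startswith s "import " then 0
  else if s = "" then 1
  else 2

-- Source B's outer while loop: each step consumes one maximal run of same-class lines
-- (the inner `while j < n` scan is takeWhile/dropWhile) and emits that run's output
def pvRuns : List String → Bool → Bool → List String
  | [], _, _ => []
  | l :: rest, ph, pend =>
    if pvClassify l = 0 then
      (if ph then [] else ["// (Imports omitted to save token count)"]) ++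
        pvRuns (rest.dropWhile (fun x => pvClassify x = pvClassify l)) true true
    else if pvClassify l = 1 then
      (if pend then [] else l :: rest.takeWhile (fun x => pvClassify x = pvClassify l)) ++
        pvRuns (rest.dropWhile (fun x => pvClassify x = pvClassify l)) ph pend
    else
      (if pend then [""] else []) ++
        (l :: rest.takeWhile (fun x => pvClassify x = pvClassify l)) ++
        pvRuns (rest.dropWhile (fun x => pvClassify x = pvClassify l)) ph false
termination_by xs => xs.length
decreasing_by
  all_goals
    simpa using Nat.lt_succ_of_le (List.length_dropWhile_le _ _)

def remove_java_imports_alt (content : String) : String :=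
  PySem.Str.join "\n" (pvRuns (PySem.Str.splitlines content) false false)

-- ===== PRECONDITION & SPEC =====
def Spec_remove_java_imports (content : String) (out : String) : Prop := out = remove_java_imports_alt content
instance (content : String) (out : String) : Decidable (Spec_remove_java_imports content out) := by unfold Spec_remove_java_imports; infer_instance

-- ===== CLAIM (what is proved, stated in full; the proofs are below) =====
def Claim_equal_remove_java_imports : Prop := ∀ (content : String), Dom_remove_java_imports content → Spec_remove_java_imports content (remove_java_imports content)

-- ===== LEMMAS AND PROOFS =====

-- the run-based walk also satisfies a per-line unfolding (a run is one line plus the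
-- same-class run of the tail, processed under the state the first line establishes)
theorem pvRuns_cons (l : String) (rest : List String) (ph pend : Bool) :
    pvRuns (l :: rest) ph pend =
      if pvClassify l = 0 then
        (if ph then [] else ["// (Imports omitted to save token count)"]) ++ pvRuns rest true true
      else if pvClassify l = 1 then
        (if pend then [] else [l]) ++ pvRuns rest ph pend
      else
        (if pend then [""] else []) ++ [l] ++ pvRuns rest ph false := by
  cases rest with
  | nil =>
    simp only [pvRuns, List.takeWhile_nil, List.dropWhile_nil]
  | cons m rest2 =>
    by_cases hm : pvClassify m = pvClassify l
    · by_cases h0 : pvClassify l = 0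
      · have hm0 : pvClassify m = 0 := by rw [hm, h0]
        simp only [pvRuns, h0, hm0, List.dropWhile_cons, decide_true,
          if_true, List.nil_append]
      · by_cases h1 : pvClassify l = 1
        · have hm1 : pvClassify m = 1 := by rw [hm, h1]
          simp only [pvRuns, h1, hm1, List.dropWhile_cons, List.takeWhile_cons,
            decide_true, if_true]
          cases pend <;> simp
        · have hm0' : ¬ pvClassify m = 0 := by rw [hm]; exact h0
          have hm1' : ¬ pvClassify m = 1 := by rw [hm]; exact h1
          simp only [pvRuns, h0, h1, List.dropWhile_cons,
            List.takeWhile_cons, hm, decide_true, if_true]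
          cases pend <;> simp
    · have ht : List.takeWhile (fun x => pvClassify x = pvClassify l) (m :: rest2) = [] := by
        simp [hm]
      have hd : List.dropWhile (fun x => pvClassify x = pvClassify l) (m :: rest2) = m :: rest2 := by
        simp [hm]
      simp only [pvRuns, ht, hd]

-- A's fold, started on any accumulator and flags, produces the accumulator followed by
-- what the run-based walk produces from the same flags
theorem foldA_eq (lines : List String) (acc : List String) (pend ph : Bool) :
    (lines.foldl
      (fun (s : List String × Bool × Bool) line =>
        let stripped := PySem.Str.strip line
        if PySem.Str.startswith stripped "import " then
          (if s.2.2 = false then s.1 ++ ["// (Imports omitted to save token count)"] else s.1,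
           true, true)
        else if s.2.1 then
          if stripped = "" then s
          else (s.1 ++ ["", line], false, s.2.2)
        else
          (s.1 ++ [line], s.2.1, s.2.2))
      (acc, pend, ph)).1 = acc ++ pvRuns lines ph pend := by
  induction lines generalizing acc pend ph with
  | nil => simp [pvRuns]
  | cons l rest ih =>
    rw [List.foldl_cons, pvRuns_cons]
    by_cases h0 : PySem.Str.startswith (PySem.Str.strip l) "import "
    · have hc : pvClassify l = 0 := by
        simp only [pvClassify]; rw [if_pos h0]
      simp only [h0, if_true, hc]
      rw [ih]
      cases ph <;> simp
    · by_cases h1 : PySem.Str.strip l = ""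
      · have hc : pvClassify l = 1 := by
          simp only [pvClassify]; rw [if_neg h0, if_pos h1]
        simp only [h0, Bool.false_eq_true, if_false, hc, Nat.one_ne_zero]
        cases pend with
        | true => simp only [if_true, h1]; rw [ih]; simp
        | false => simp only [Bool.false_eq_true, if_false]; rw [ih]; simp
      · have hc : pvClassify l = 2 := by
          simp only [pvClassify]; rw [if_neg h0, if_neg h1]
        simp only [h0, Bool.false_eq_true, if_false, hc, Nat.succ_ne_zero, OfNat.ofNat_ne_one]
        cases pend with
        | true => simp only [if_true, if_neg h1]; rw [ih]; simp
        | false => simp only [Bool.false_eq_true, if_false]; rw [ih]; simp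

-- ===== VERDICT (by name: the statement is the Claim_ definition above) =====
theorem remove_java_imports_spec : Claim_equal_remove_java_imports := by
  intro content _
  unfold Spec_remove_java_imports remove_java_imports remove_java_imports_alt
  rw [foldA_eq]
  simp
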